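-- pv_equiv track=rewrite | github.com/luukschn/sudoku | sudoku_failed_trial/sudoku_change_values.py | alter_row
-- ===== SOURCE A (Python) =====
-- def alter_row(S, row_number):
--     number_array = [1,2,3,4,5,6,7,8,9]
--
--     row_values_set = set(S[row_number])
--     input_values = [x for x in number_array if x not in row_values_set]
--
--     break_out_flag = False
--     for i in range(9):
--         for j in range(9):
--             if (S[row_number][i] == S[row_number][j]) and (i != j):
--                 S[row_number][i] = input_values[0]
--                 break_out_flag = True
--                 return S
--         if break_out_flag:
--             break
-- ===== SOURCE B (Python) =====
-- def alter_row(S, row_number):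
--     row = S[row_number]
--     missing = [n for n in range(1, 10) if n not in set(row)]
--     first9 = row[:9]
--     counts = {}
--     for v in first9:
--         counts[v] = counts.get(v, 0) + 1
--     for i, v in enumerate(first9):
--         if counts[v] > 1:
--             row[i] = missing[0]
--             return S
-- ===== Notes on version B (the rewrite author's own statement) =====
-- stated objective: simpler
-- what changed: A's nested 9x9 index-pair scan is replaced by building a frequency table of the 9-cell window once and making a single enumerate pass that stops at the first index whose value occurs more than once.
-- outside the precondition, e.g. on alter_row([[1, 2, 3, 4, 5, 6, 7, 8, 9]], 0): A returns None, B returns None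
import Mathlib
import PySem

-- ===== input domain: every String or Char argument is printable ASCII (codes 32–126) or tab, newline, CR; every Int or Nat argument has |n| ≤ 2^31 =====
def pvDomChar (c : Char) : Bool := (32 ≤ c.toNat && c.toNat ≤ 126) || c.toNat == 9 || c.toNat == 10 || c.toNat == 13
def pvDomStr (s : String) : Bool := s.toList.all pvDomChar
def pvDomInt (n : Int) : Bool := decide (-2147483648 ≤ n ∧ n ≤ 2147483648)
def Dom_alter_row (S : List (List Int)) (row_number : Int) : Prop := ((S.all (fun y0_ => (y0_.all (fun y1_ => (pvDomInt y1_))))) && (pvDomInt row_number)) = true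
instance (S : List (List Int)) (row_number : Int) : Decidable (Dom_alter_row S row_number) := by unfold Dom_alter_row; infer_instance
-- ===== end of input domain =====

-- B replaces A's nested 9×9 index-pair scan by a one-pass frequency count: equivalence is about the
-- RETURN value only (both Pythons mutate S[row_number] in place in the same way before returning S).

-- ===== PORT A =====
-- row accesses S[row_number][i] are ported with pyGetD (exact under Pre_: the row index is in range,
-- and the loop only reaches in-range cell indices before its early return on Pre_ inputs);
-- the early-returning inner/outer for-loops are ported as List.any / List.find? over range(9).
def alter_row (S : List (List Int)) (row_number : Int) : List (List Int) :=
  let number_array : List Int := [1,2,3,4,5,6,7,8,9]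
  let row := PySem.List.pyGetD S row_number []
  let row_values_set := PySem.Set.ofList row
  let input_values := number_array.filter (fun x => !(PySem.Set.contains row_values_set x))
  match (List.range 9).find? (fun i =>
      (List.range 9).any (fun j => (row.getD i 0 == row.getD j 0) && !(i == j))) with
  | some i => PySem.List.pySetD S row_number (row.set i (input_values.getD 0 0))
  | none => S

-- ===== PORT B =====
def alter_row_alt (S : List (List Int)) (row_number : Int) : List (List Int) :=
  let row := PySem.List.pyGetD S row_number []
  let missing := (PySem.List.pyRange 1 10 1).filter (fun n => !(PySem.Set.contains (PySem.Set.ofList row) n))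
  let first9 := PySem.List.slice row none (some 9)
  let counts := first9.foldl (fun d v => d.insert v (d.getD v 0 + 1)) (PySem.Dict.empty : PySem.Dict Int Int)
  match (PySem.List.enumerate first9 0).find? (fun p => counts.getD p.2 0 > 1) with
  | some (i, _) => PySem.List.pySetD S row_number (PySem.List.pySetD row i (missing.getD 0 0))
  | none => S

-- ===== PRECONDITION & SPEC =====
-- Pre_ excludes exactly the inputs on which Python A does not return a list: an out-of-range row
-- index and a short row whose first cell is unduplicated raise IndexError, a duplicate-free first-9
-- window makes A return None (not a list; B returns None there too), and a duplicated row that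
-- still contains all of 1..9 raises IndexError at input_values[0].
def Pre_alter_row (S : List (List Int)) (row_number : Int) : Prop :=
  PySem.Raise.InRange S.length row_number ∧
  (let row := PySem.List.pyGetD S row_number []
   (∃ v ∈ ([1,2,3,4,5,6,7,8,9] : List Int), v ∉ row) ∧
   (if row.length < 9 then 2 ≤ row.count (row.headD 0) else ¬ (row.take 9).Nodup))
instance (S : List (List Int)) (row_number : Int) : Decidable (Pre_alter_row S row_number) := by unfold Pre_alter_row; infer_instance
def pvWitness_alter_row : List (List Int) × Int := ([[1,1,3,4,5,6,7,8,9]], 0)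
def Spec_alter_row (S : List (List Int)) (row_number : Int) (out : List (List Int)) : Prop := out = alter_row_alt S row_number
instance (S : List (List Int)) (row_number : Int) (out : List (List Int)) : Decidable (Spec_alter_row S row_number out) := by unfold Spec_alter_row; infer_instance

-- ===== CLAIM (what is proved, stated in full; the proofs are below) =====
def Claim_equal_alter_row : Prop := ∀ (S : List (List Int)) (row_number : Int), Dom_alter_row S row_number → Pre_alter_row S row_number → Spec_alter_row S row_number (alter_row S row_number)

-- ===== LEMMAS AND PROOFS =====

theorem pv_find?_enumerate_fst {α : Type} (q : α → Bool) (xs : List α) (s : Int) :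
    ((PySem.List.enumerate xs s).find? (fun p => q p.2)).map Prod.fst
      = (xs.findIdx? q).map (fun i => s + (i : Int)) := by
  induction xs generalizing s with
  | nil => rfl
  | cons x t ih =>
    show ((((s,x) :: PySem.List.enumerate t (s+1)).find? (fun p => q p.2)).map Prod.fst) = _
    rw [List.find?_cons, List.findIdx?_cons]
    by_cases h : q x
    · simp [h]
    · simp only [h, Bool.false_eq_true, if_false]
      rw [ih (s+1)]
      cases List.findIdx? q t <;> simp
      omega

theorem pv_find?_range'_eq_findIdx? (xs : List Int) (k : Nat) (p : Nat → Bool) (q : Int → Bool)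
    (h : ∀ i (_ : i < xs.length), p (k + i) = q (xs.getD i 0)) :
    (List.range' k xs.length).find? p = ((xs.findIdx? q).map (fun i => k + i)) := by
  induction xs generalizing k with
  | nil => rfl
  | cons x t ih =>
    rw [show (x::t).length = t.length + 1 from rfl, List.range'_succ, List.find?_cons, List.findIdx?_cons]
    have h0 := h 0 (by simp)
    simp only [Nat.add_zero] at h0
    by_cases hq : q x
    · simp [h0, hq]
    · rw [h0]
      simp only [hq, Bool.false_eq_true, if_false]
      rw [ih (k+1) (fun i hi => by have := h (i+1) (by simpa using Nat.succ_lt_succ hi); simpa [Nat.add_assoc, Nat.add_comm 1 i] using this)]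
      cases List.findIdx? q t <;> simp [hq, Nat.add_assoc, Nat.add_comm 1]

theorem pv_two_le_count_iff (t : List Int) (i : Nat) (hi : i < t.length) :
    2 ≤ t.count t[i] ↔ ∃ j, ∃ hj : j < t.length, j ≠ i ∧ t[j]'hj = t[i] := by
  rw [← List.duplicate_iff_two_le_count, List.duplicate_iff_exists_distinct_get]
  constructor
  · rintro ⟨n, m, hnm, h1, h2⟩
    by_cases hn : (n : Nat) = i
    · refine ⟨m, m.isLt, by omega, ?_⟩
      simp only [List.get_eq_getElem] at h2
      exact h2.symm
    · refine ⟨n, n.isLt, hn, ?_⟩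
      simp only [List.get_eq_getElem] at h1
      exact h1.symm
  · rintro ⟨j, hj, hne, heq⟩
    rcases Nat.lt_or_gt_of_ne hne with h | h
    · exact ⟨⟨j, hj⟩, ⟨i, hi⟩, h, by simp [heq], by simp⟩
    · exact ⟨⟨i, hi⟩, ⟨j, hj⟩, h, by simp, by simp [heq]⟩

-- ===== VERDICT (by name: the statement is the Claim_ definition above) =====
theorem alter_row_spec : Claim_equal_alter_row := by
  intro S rn _ hpre
  obtain ⟨hin, hmiss, hcond⟩ := hpre
  unfold Spec_alter_row
  simp only [alter_row, alter_row_alt]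
  set row := PySem.List.pyGetD S rn [] with hrowdef
  have hsl : PySem.List.slice row none (some 9) = row.take 9 := by
    rw [show (9:Int) = ((9:Nat):Int) from rfl, PySem.List.slice_to_natCast]
  simp only [hsl, PySem.Dict.foldl_insert_getD_add_one_eq_counter,
    show PySem.List.pyRange 1 10 1 = [1,2,3,4,5,6,7,8,9] by decide]
  set t := row.take 9 with htdef
  set m := ([1,2,3,4,5,6,7,8,9] : List Int).filter (fun x => !(PySem.Set.contains (PySem.Set.ofList row) x)) with hmdef
  have hBpred : (fun p : Int × Int => decide ((PySem.Dict.counter t).getD p.2 0 > 1))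
      = (fun p : Int × Int => decide (2 ≤ List.count p.2 t)) := by
    funext p
    rw [PySem.Dict.getD_counter]
    simp only [decide_eq_decide]
    omega
  rw [hBpred]
  have hB := pv_find?_enumerate_fst (fun v => decide (2 ≤ List.count v t)) t 0
  set pA : Nat → Bool := (fun i => (List.range 9).any fun j => row.getD i 0 == row.getD j 0 && !(i == j)) with hpA
  clear_value m t row
  by_cases hlen : row.length < 9
  · -- short row: the duplicate is at index 0
    rw [if_pos hlen] at hcond
    have hne : row ≠ [] := by
      intro h
      rw [h] at hcond
      simp at hcond
    obtain ⟨x, rest, hx⟩ := List.exists_cons_of_ne_nil hne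
    have ht' : t = row := by rw [htdef, List.take_of_length_le (by omega)]
    have hcx : 2 ≤ List.count x row := by rw [hx] at hcond ⊢; simpa using hcond
    have hxr : x ∈ rest := by
      rw [hx] at hcx
      rw [List.count_cons_self] at hcx
      exact List.count_pos_iff.mp (by omega)
    obtain ⟨k, hk, hkx⟩ := List.mem_iff_getElem.mp hxr
    have hA0 : pA 0 = true := by
      rw [hpA]
      rw [List.any_eq_true]
      refine ⟨k + 1, List.mem_range.mpr (by rw [hx] at hlen; simp at hlen; omega), ?_⟩
      rw [hx]
      simp only [List.getD_cons_zero, List.getD_cons_succ, Bool.and_eq_true, beq_iff_eq]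
      constructor
      · rw [List.getD_eq_getElem rest 0 hk, hkx]
      · simp
    rw [show List.range 9 = 0 :: [1,2,3,4,5,6,7,8] from by decide,
      List.find?_cons_of_pos hA0]
    have hcx' : 2 ≤ List.count x (x :: rest) := by rw [hx] at hcx; exact hcx
    rw [ht', hx, show PySem.List.enumerate (x :: rest) 0
        = ((0 : Int), x) :: PySem.List.enumerate rest 1 from rfl,
      List.find?_cons_of_pos (by simpa using hcx')]
    simp [PySem.List.pySetD_of_nonneg]
  · -- full row: both sides find the first index of a duplicated value in the 9-cell window
    have h9 : t.length = 9 := by rw [htdef]; simp [List.length_take]; omega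
    have hcomp : ∀ i (_ : i < t.length), pA (0 + i) = decide (2 ≤ List.count (t.getD i 0) t) := by
      intro i hi
      rw [hpA, Nat.zero_add]
      have hi9 : i < 9 := by omega
      have hgd : ∀ j (hj : j < 9), row.getD j 0 = t[j]'(h9 ▸ hj) := by
        intro j hj
        have hjr : j < row.length := by omega
        have : t[j]'(h9 ▸ hj) = row[j]'hjr := by
          simp only [htdef]
          exact List.getElem_take
        rw [this]
        exact List.getD_eq_getElem row 0 hjr
      have hti : t.getD i 0 = t[i]'hi := List.getD_eq_getElem t 0 hi
      rw [Bool.eq_iff_iff]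
      simp only [List.any_eq_true, List.mem_range, Bool.and_eq_true, beq_iff_eq,
        decide_eq_true_eq, Bool.not_eq_eq_eq_not, Bool.not_true, beq_eq_false_iff_ne, ne_eq]
      rw [hti, pv_two_le_count_iff t i (by omega)]
      constructor
      · rintro ⟨j, hj9, heq, hne⟩
        exact ⟨j, by omega, Ne.symm hne, by rw [← hgd j hj9, ← hgd i hi9, heq]⟩
      · rintro ⟨j, hj, hne, heq⟩
        exact ⟨j, by omega, by rw [hgd j (by omega), hgd i hi9, heq], Ne.symm hne⟩
    have hA := pv_find?_range'_eq_findIdx? t 0 pA (fun v => decide (2 ≤ List.count v t)) hcomp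
    rw [show List.range 9 = List.range' 0 t.length from by rw [h9]; exact List.range_eq_range', hA]
    cases hf : t.findIdx? (fun v => decide (2 ≤ List.count v t)) with
    | none =>
      have hfn : List.find? (fun p => decide (2 ≤ List.count p.2 t)) (PySem.List.enumerate t) = none :=
        Option.map_eq_none_iff.mp (by rw [hB, hf]; rfl)
      rw [hfn]
      rfl
    | some i =>
      rw [hf] at hB
      simp at hB
      obtain ⟨v', hfind⟩ := hB
      rw [hfind]
      simp [PySem.List.pySetD_natCast]
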